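-- pv_equiv track=rewrite | github.com/noospheer/Liun | src/liun/gf61.py | lagrange_basis_at_zero
-- ===== SOURCE A (Python) =====
-- M61 = (1 << 61) - 1  # 2^61 - 1 = 2305843009213693951
--
-- def _reduce(x: int) -> int:
--     """Fast reduction mod M61 using Mersenne prime structure.
--
--     For x < 2^122 (product of two 61-bit numbers):
--       x mod (2^61 - 1) = (x >> 61) + (x & M61), with a final correction.
--     """
--     # First reduction: split into high and low 61-bit halves
--     r = (x >> 61) + (x & M61)
--     # r might be >= M61 (at most 2*M61 - 1), so fix up
--     if r >= M61:
--         r -= M61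
--     return r
--
-- def sub(a: int, b: int) -> int:
--     """(a - b) mod M61."""
--     s = a - b
--     if s < 0:
--         s += M61
--     return s
--
-- def mul(a: int, b: int) -> int:
--     """(a * b) mod M61. Python int handles 122-bit intermediate."""
--     return _reduce(a * b)
--
-- def neg(a: int) -> int:
--     """(-a) mod M61."""
--     return M61 - a if a != 0 else 0
--
-- def inv(a: int) -> int:
--     """Multiplicative inverse via Fermat's little theorem: a^(M61-2) mod M61.
--
--     For Mersenne prime p, a^(-1) = a^(p-2) mod p.
--     Uses Python's built-in modular exponentiation (fast square-and-multiply).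
--     """
--     if a == 0:
--         raise ZeroDivisionError("Cannot invert zero in GF(M61)")
--     return pow(a, M61 - 2, M61)
--
-- def lagrange_basis_at_zero(xs: list, i: int) -> int:
--     """Compute Lagrange basis coefficient L_i(0) for evaluation at x=0.
--
--     xs = list of x-coordinates.
--     Returns prod_{j!=i} (0 - x_j) / (x_i - x_j) mod M61.
--     """
--     xi = xs[i]
--     num = 1
--     den = 1
--     for j, xj in enumerate(xs):
--         if j == i:
--             continue
--         num = mul(num, neg(xj))       # (0 - x_j)
--         den = mul(den, sub(xi, xj))   # (x_i - x_j)
--     return mul(num, inv(den))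
-- ===== SOURCE B (Python) =====
-- M61 = (1 << 61) - 1  # 2^61 - 1 = 2305843009213693951
--
-- def _reduce(x: int) -> int:
--     r = (x >> 61) + (x & M61)
--     if r >= M61:
--         r -= M61
--     return r
--
-- def sub(a: int, b: int) -> int:
--     s = a - b
--     if s < 0:
--         s += M61
--     return s
--
-- def mul(a: int, b: int) -> int:
--     return _reduce(a * b)
--
-- def neg(a: int) -> int:
--     return M61 - a if a != 0 else 0
--
-- def inv(a: int) -> int:
--     if a == 0:
--         raise ZeroDivisionError("Cannot invert zero in GF(M61)")
--     return pow(a, M61 - 2, M61)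
--
-- def lagrange_basis_at_zero(xs: list, i: int) -> int:
--     """L_i(0) by staged passes: filter out x_i once, then one pass for the
--     numerator product and one pass accumulating the PER-TERM modular inverses
--     of the denominators (no batched final inversion)."""
--     xi = xs[i]
--     others = [x for j, x in enumerate(xs) if j != i]
--     num = 1
--     for x in others:
--         num = mul(num, neg(x))
--     invden = 1
--     for x in others:
--         invden = mul(invden, inv(sub(xi, x)))
--     return mul(num, invden)
-- ===== Notes on version B (the rewrite author's own statement) =====
-- stated objective: alternative
-- what changed: B replaces A's single enumerate pass with pair state and one batched final inversion by staged passes: it filters out x_i once, then runs one loop for the numerator product and a separate loop that accumulates per-term Fermat inverses of the denominators, returning num*invden with no final inversion.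
import Mathlib
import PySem

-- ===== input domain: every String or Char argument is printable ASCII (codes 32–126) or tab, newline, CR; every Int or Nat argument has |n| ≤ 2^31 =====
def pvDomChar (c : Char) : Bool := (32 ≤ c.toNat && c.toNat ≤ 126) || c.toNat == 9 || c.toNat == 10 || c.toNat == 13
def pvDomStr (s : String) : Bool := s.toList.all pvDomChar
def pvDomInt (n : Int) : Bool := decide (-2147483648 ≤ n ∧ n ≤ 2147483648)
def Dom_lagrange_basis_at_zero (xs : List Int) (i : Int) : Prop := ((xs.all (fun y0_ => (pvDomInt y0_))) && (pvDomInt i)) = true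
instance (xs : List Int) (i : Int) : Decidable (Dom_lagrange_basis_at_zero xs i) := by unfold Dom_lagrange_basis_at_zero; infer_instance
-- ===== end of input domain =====

-- B computes L_i(0) by staged passes (filter out x_i once, one loop for the numerator,
-- one loop of per-term Fermat inverses, no batched final inversion) instead of A's single
-- enumerate pass with pair state and one inversion at the end; equal return values are
-- proved on Pre_ (where the Python A returns instead of raising).

-- ===== PORT A =====
-- shared module helpers (same-module context of Source A, used by both Pythons)
def pvM61 : Int := 2305843009213693951

-- _reduce: 'x >> 61' is Int '>>>' (floor shift), 'x & M61' is PySem.Int.band — both Python-exact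
def pvReduce (x : Int) : Int :=
  let r := (x >>> (61 : Nat)) + PySem.Int.band x pvM61
  if r ≥ pvM61 then r - pvM61 else r

def pvSub (a b : Int) : Int :=
  let s := a - b
  if s < 0 then s + pvM61 else s

def pvMul (a b : Int) : Int := pvReduce (a * b)

def pvNeg (a : Int) : Int := if a ≠ 0 then pvM61 - a else 0

-- pow(b, e, m): Python's built-in modular exponentiation (square-and-multiply), ported by
-- hand as binary exponentiation; exact: pvPowMod a e m = a ^ e % m (pvPowMod_eq below).
def pvPowMod (a : Int) (e : Nat) (m : Int) : Int :=
  if e = 0 then 1 % m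
  else
    let r := pvPowMod a (e / 2) m
    if e % 2 = 0 then r * r % m else r * r % m * (a % m) % m
decreasing_by exact Nat.div_lt_self (Nat.pos_of_ne_zero (by assumption)) one_lt_two

-- inv: Python raises ZeroDivisionError at a = 0 (excluded by Pre_); 0 is a junk value there.
def pvInv (a : Int) : Int := if a = 0 then 0 else pvPowMod a 2305843009213693949 pvM61

-- A: one loop over enumerate(xs) accumulating num = prod of neg(xj) and den = prod of sub(xi,xj),
-- one inversion of den at the end.  xs[i] = pyGet? (none = IndexError, outside Pre_, junk 0).
def lagrange_basis_at_zero (xs : List Int) (i : Int) : Int :=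
  match PySem.List.pyGet? xs i with
  | none => 0
  | some xi =>
    let st := (PySem.List.enumerate xs).foldl
      (fun (s : Int × Int) (p : Int × Int) =>
        if p.1 = i then s
        else (pvMul s.1 (pvNeg p.2), pvMul s.2 (pvSub xi p.2)))
      (1, 1)
    pvMul st.1 (pvInv st.2)

-- ===== PORT B =====
-- B: 'others' = list comprehension dropping index i; then two separate scalar loops:
-- num = prod of neg(x), invden = prod of inv(sub(xi, x)) (one inversion per term);
-- returns mul(num, invden) with no final inversion.
def lagrange_basis_at_zero_alt (xs : List Int) (i : Int) : Int :=
  match PySem.List.pyGet? xs i with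
  | none => 0
  | some xi =>
    let others := ((PySem.List.enumerate xs).filter (fun p => p.1 != i)).map (fun p => p.2)
    let num := others.foldl (fun n x => pvMul n (pvNeg x)) 1
    let invden := others.foldl (fun d x => pvMul d (pvInv (pvSub xi x))) 1
    pvMul num invden

-- ===== PRECONDITION & SPEC =====
-- Exactly where the Python A returns: a valid non-negative index (for i < 0 Python indexes
-- xs[i] fine but the loop's 'j == i' never fires, the j = i+n factor is sub(xi,xi) = 0 and A
-- raises ZeroDivisionError; i ≥ len raises IndexError) and no duplicate of xs[i] elsewhere
-- (which also makes A raise ZeroDivisionError).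
def Pre_lagrange_basis_at_zero (xs : List Int) (i : Int) : Prop :=
  0 ≤ i ∧ i < xs.length ∧
  ∀ j : Nat, j < xs.length → (j : Int) ≠ i → xs.getD j 0 ≠ xs.getD i.toNat 0
instance (xs : List Int) (i : Int) : Decidable (Pre_lagrange_basis_at_zero xs i) := by
  unfold Pre_lagrange_basis_at_zero; infer_instance

def pvWitness_lagrange_basis_at_zero : List Int × Int := ([2, 5], 0)

def Spec_lagrange_basis_at_zero (xs : List Int) (i : Int) (out : Int) : Prop := out = lagrange_basis_at_zero_alt xs i
instance (xs : List Int) (i : Int) (out : Int) : Decidable (Spec_lagrange_basis_at_zero xs i out) := by unfold Spec_lagrange_basis_at_zero; infer_instance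

-- ===== CLAIM (what is proved, stated in full; the proofs are below) =====
def Claim_equal_lagrange_basis_at_zero : Prop := ∀ (xs : List Int) (i : Int), Dom_lagrange_basis_at_zero xs i → Pre_lagrange_basis_at_zero xs i → Spec_lagrange_basis_at_zero xs i (lagrange_basis_at_zero xs i)

-- ===== LEMMAS AND PROOFS =====

-- the Fermat exponent M61 - 2
def pvE : Nat := 2305843009213693949

theorem pvReduce_eq (x : Int) (h0 : 0 ≤ x) (h1 : x < pvM61 * 2 ^ 61) :
    pvReduce x = x % pvM61 := by
  have hband : PySem.Int.band x pvM61 = x % 2 ^ 61 := by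
    have : PySem.Int.band x pvM61 = ((x.toNat &&& (2 ^ 61 - 1) : Nat) : Int) := by
      have := PySem.Int.band_of_nonneg (a := x) (b := pvM61) h0 (by norm_num [pvM61])
      simpa [pvM61] using this
    rw [this, Nat.and_two_pow_sub_one_eq_mod]
    omega
  have hshift : x >>> (61 : Nat) = x / 2 ^ 61 := by
    simpa using Int.shiftRight_eq_div_pow x 61
  simp only [pvReduce, hshift, hband, pvM61] at *
  omega

theorem pvMul_canon {a b : Int} (ha0 : 0 ≤ a) (ha : a < pvM61) (hb0 : 0 ≤ b) (hb : b < pvM61) :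
    pvMul a b = (a * b) % pvM61 := by
  have hab : a * b ≤ (pvM61 - 1) * (pvM61 - 1) := by
    apply mul_le_mul (by omega) (by omega) hb0 (by norm_num [pvM61])
  refine pvReduce_eq _ (mul_nonneg ha0 hb0) ?_
  have : (pvM61 - 1) * (pvM61 - 1) < pvM61 * 2 ^ 61 := by norm_num [pvM61]
  omega

theorem pvMul_bounds {a b : Int} (ha0 : 0 ≤ a) (ha : a < pvM61) (hb0 : 0 ≤ b) (hb : b < pvM61) :
    0 ≤ pvMul a b ∧ pvMul a b < pvM61 := by
  rw [pvMul_canon ha0 ha hb0 hb]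
  constructor
  · exact Int.emod_nonneg _ (by norm_num [pvM61])
  · exact Int.emod_lt_of_pos _ (by norm_num [pvM61])

theorem pvSub_bounds {a b : Int} (ha : -2147483648 ≤ a ∧ a ≤ 2147483648)
    (hb : -2147483648 ≤ b ∧ b ≤ 2147483648) : 0 ≤ pvSub a b ∧ pvSub a b < pvM61 := by
  simp only [pvSub, pvM61]
  split <;> omega

theorem pvPowMod_eq (a m : Int) (_hm : 0 < m) : ∀ e, pvPowMod a e m = a ^ e % m := by
  intro e
  induction e using Nat.strong_induction_on with
  | _ e ih =>
    rw [pvPowMod]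
    split
    · rename_i h0; subst h0; rw [pow_zero]
    · rename_i h0
      rw [ih _ (Nat.div_lt_self (Nat.pos_of_ne_zero h0) one_lt_two)]
      have hsq : a ^ (e / 2) % m * (a ^ (e / 2) % m) % m = a ^ (e / 2 + e / 2) % m := by
        rw [← Int.mul_emod, pow_add]
      split
      · rename_i hev
        show a ^ (e / 2) % m * (a ^ (e / 2) % m) % m = a ^ e % m
        rw [hsq]
        have h2 : e / 2 + e / 2 = e := by omega
        rw [h2]
      · rename_i hod
        show a ^ (e / 2) % m * (a ^ (e / 2) % m) % m * (a % m) % m = a ^ e % m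
        rw [hsq, ← Int.mul_emod, ← pow_succ]
        have h2 : e / 2 + e / 2 + 1 = e := by omega
        rw [h2]

theorem pvInv_eq {s : Int} (h0 : 0 ≤ s) : pvInv s = s ^ pvE % pvM61 := by
  unfold pvInv
  split
  · subst s
    rw [zero_pow (by norm_num [pvE])]
    norm_num
  · rw [pvPowMod_eq _ _ (by norm_num [pvM61])]
    rfl

theorem pvInv_bounds {s : Int} (h0 : 0 ≤ s) : 0 ≤ pvInv s ∧ pvInv s < pvM61 := by
  rw [pvInv_eq h0]
  exact ⟨Int.emod_nonneg _ (by norm_num [pvM61]), Int.emod_lt_of_pos _ (by norm_num [pvM61])⟩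

-- one step of the (den, inverse-product) relation
theorem pvStep {d r s : Int} (hd0 : 0 ≤ d) (hd : d < pvM61) (hs0 : 0 ≤ s) (hs : s < pvM61)
    (hr : r = d ^ pvE % pvM61) :
    pvMul r (pvInv s) = (pvMul d s) ^ pvE % pvM61 := by
  have hM : (0 : Int) < pvM61 := by norm_num [pvM61]
  have hr0 : 0 ≤ r := hr ▸ Int.emod_nonneg _ (by omega)
  have hrM : r < pvM61 := hr ▸ Int.emod_lt_of_pos _ hM
  have hi := pvInv_bounds hs0
  rw [pvMul_canon hr0 hrM hi.1 hi.2, pvMul_canon hd0 hd hs0 hs, pvInv_eq hs0, hr]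
  calc d ^ pvE % pvM61 * (s ^ pvE % pvM61) % pvM61
      = d ^ pvE * s ^ pvE % pvM61 := by rw [← Int.mul_emod]
    _ = (d * s) ^ pvE % pvM61 := by rw [mul_pow]
    _ = (d * s % pvM61) ^ pvE % pvM61 :=
        (Int.ModEq.pow pvE (Int.emod_emod_of_dvd (d * s) dvd_rfl)).symm

-- A's pair fold with a skip-branch splits into two scalar folds over the filtered values
theorem pvFoldSplit (i : Int) (f g : Int → Int → Int) (L : List (Int × Int)) :
    ∀ n d, L.foldl
        (fun (s : Int × Int) (p : Int × Int) =>
          if p.1 = i then s else (f s.1 p.2, g s.2 p.2)) (n, d)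
      = (((L.filter (fun p => p.1 != i)).map (fun p => p.2)).foldl f n,
         ((L.filter (fun p => p.1 != i)).map (fun p => p.2)).foldl g d) := by
  induction L with
  | nil => intro n d; rfl
  | cons p L ih =>
    intro n d
    by_cases h : p.1 = i
    · simp [List.foldl_cons, h, ih]
    · simp [List.foldl_cons, h, ih]

-- loop invariant of the denominator side: B's running product of per-term inverses equals
-- the (canonical) denominator product raised to the Fermat exponent
theorem pvDenLoop (xi : Int) (ys : List Int)
    (hy : ∀ y ∈ ys, 0 ≤ pvSub xi y ∧ pvSub xi y < pvM61) :
    ∀ d r, 0 ≤ d → d < pvM61 → r = d ^ pvE % pvM61 →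
      ys.foldl (fun s y => pvMul s (pvInv (pvSub xi y))) r
        = (ys.foldl (fun s y => pvMul s (pvSub xi y)) d) ^ pvE % pvM61
      ∧ 0 ≤ ys.foldl (fun s y => pvMul s (pvSub xi y)) d := by
  induction ys with
  | nil => intro d r hd0 _ hr; exact ⟨hr ▸ rfl, hd0⟩
  | cons y ys ih =>
    intro d r hd0 hd hr
    have hyy := hy y (List.mem_cons_self ..)
    have hy' : ∀ z ∈ ys, 0 ≤ pvSub xi z ∧ pvSub xi z < pvM61 :=
      fun z hz => hy z (List.mem_cons_of_mem _ hz)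
    rw [List.foldl_cons, List.foldl_cons]
    have hdb := pvMul_bounds hd0 hd hyy.1 hyy.2
    exact ih hy' (pvMul d (pvSub xi y)) (pvMul r (pvInv (pvSub xi y))) hdb.1 hdb.2
      (pvStep hd0 hd hyy.1 hyy.2 hr)

-- ===== VERDICT (by name: the statement is the Claim_ definition above) =====
theorem lagrange_basis_at_zero_spec : Claim_equal_lagrange_basis_at_zero := by
  intro xs i hDom _
  unfold Spec_lagrange_basis_at_zero
  unfold lagrange_basis_at_zero lagrange_basis_at_zero_alt
  cases hget : PySem.List.pyGet? xs i with
  | none => rfl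
  | some xi =>
    simp only []
    rw [pvFoldSplit i (fun n x => pvMul n (pvNeg x)) (fun d x => pvMul d (pvSub xi x))
      (PySem.List.enumerate xs) 1 1]
    have hdom : ∀ x ∈ xs, -2147483648 ≤ x ∧ x ≤ 2147483648 := by
      intro x hx
      have := (List.all_eq_true.mp (Bool.and_eq_true_iff.mp hDom).1) x hx
      simpa [pvDomInt] using this
    have hxi := hdom xi (PySem.List.mem_of_pyGet?_eq_some xs hget)
    have hy : ∀ y ∈ ((PySem.List.enumerate xs).filter (fun p => p.1 != i)).map (fun p => p.2),
        0 ≤ pvSub xi y ∧ pvSub xi y < pvM61 := by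
      intro y hy
      obtain ⟨p, hp, rfl⟩ := List.mem_map.mp hy
      have hpx : p ∈ PySem.List.enumerate xs := List.mem_of_mem_filter hp
      have : p.2 ∈ xs := by
        obtain ⟨k, hk, rfl⟩ := (PySem.List.mem_enumerate_iff _ _ _).mp hpx
        exact List.getElem_mem hk
      exact pvSub_bounds hxi (hdom _ this)
    have key := pvDenLoop xi _ hy 1 1 (by norm_num) (by norm_num [pvM61])
      (by rw [one_pow]; norm_num [pvM61])
    rw [key.1, ← pvInv_eq key.2]
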